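-- pv_equiv track=rewrite | github.com/rumen89/HackBulgaria | week4/pairs_2.py | count_zero_pairs
-- ===== SOURCE A (Python) =====
-- def count_zero_pairs(numbers):
--     result = 0
--
--     for x in range(0, len(numbers)):
--         for y in range(x, len(numbers)):
--             i = numbers[x]
--             j = numbers[y]
--
--             if i + j == 0:
--                 result += 1
--
--     return result
-- ===== SOURCE B (Python) =====
-- def count_zero_pairs(numbers):
--     freq = {}
--     for n in numbers:
--         freq[n] = freq.get(n, 0) + 1
--     result = 0
--     for v, c in freq.items():
--         if v > 0:
--             result += c * freq.get(-v, 0)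
--     z = freq.get(0, 0)
--     return result + z * (z + 1) // 2
-- ===== Notes on version B (the rewrite author's own statement) =====
-- stated objective: faster
-- what changed: replaced the O(n^2) double index loop by a one-pass frequency dictionary: sum freq[v]*freq[-v] over positive values plus z*(z+1)/2 for the z zeros
import Mathlib
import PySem

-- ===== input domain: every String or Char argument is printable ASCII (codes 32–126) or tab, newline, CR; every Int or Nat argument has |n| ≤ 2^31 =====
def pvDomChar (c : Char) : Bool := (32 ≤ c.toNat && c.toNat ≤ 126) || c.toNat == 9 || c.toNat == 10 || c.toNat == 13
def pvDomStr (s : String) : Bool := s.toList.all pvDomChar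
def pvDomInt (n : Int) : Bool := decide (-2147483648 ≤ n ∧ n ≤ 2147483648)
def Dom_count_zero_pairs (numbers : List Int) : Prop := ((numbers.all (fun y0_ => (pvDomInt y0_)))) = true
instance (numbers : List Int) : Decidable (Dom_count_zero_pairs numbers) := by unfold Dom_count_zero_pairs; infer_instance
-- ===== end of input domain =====

-- B replaces A's O(n^2) double index loop by a one-pass frequency dictionary (faster).
-- ===== PORT A =====
def count_zero_pairs (numbers : List Int) : Int :=
  (PySem.List.pyRange 0 numbers.length 1).foldl (fun result x =>
    (PySem.List.pyRange x numbers.length 1).foldl (fun result y =>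
      let i := PySem.List.pyGetD numbers x 0
      let j := PySem.List.pyGetD numbers y 0
      if i + j = 0 then result + 1 else result) result) 0

-- ===== PORT B =====
def count_zero_pairs_alt (numbers : List Int) : Int :=
  let freq : PySem.Dict Int Int :=
    numbers.foldl (fun d n => d.insert n (d.getD n 0 + 1)) PySem.Dict.empty
  let result : Int :=
    freq.items.foldl (fun result p => if p.1 > 0 then result + p.2 * freq.getD (-p.1) 0 else result) 0
  let z := freq.getD 0 0
  result + PySem.Int.floordiv (z * (z + 1)) 2

-- ===== PRECONDITION & SPEC =====
def Spec_count_zero_pairs (numbers : List Int) (out : Int) : Prop := out = count_zero_pairs_alt numbers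
instance (numbers : List Int) (out : Int) : Decidable (Spec_count_zero_pairs numbers out) := by unfold Spec_count_zero_pairs; infer_instance

-- ===== CLAIM (what is proved, stated in full; the proofs are below) =====
def Claim_equal_count_zero_pairs : Prop := ∀ (numbers : List Int), Dom_count_zero_pairs numbers → Spec_count_zero_pairs numbers (count_zero_pairs numbers)

-- ===== LEMMAS AND PROOFS =====

/-- Common recursive specification: pairs x ≤ y with sum 0, counted head-first. -/
def pvSpec : List Int → Int
  | [] => 0
  | a :: l => (if a + a = 0 then 1 else 0) + (l.count (-a) : Int) + pvSpec l

/-- A's inner loop counts the matches of `-numbers[x]` in the suffix from `x`. -/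
theorem pv_inner (numbers : List Int) (k : Nat) (r : Int) :
    (PySem.List.pyRange (k : Int) (numbers.length : Int) 1).foldl
      (fun result y =>
        let i := PySem.List.pyGetD numbers (k : Int) 0
        let j := PySem.List.pyGetD numbers y 0
        if i + j = 0 then result + 1 else result) r
      = r + ((numbers.drop k).count (-(numbers.getD k 0)) : Int) := by
  show (PySem.List.pyRange (k : Int) (numbers.length : Int) 1).foldl
      (fun result y =>
        if PySem.List.pyGetD numbers (k : Int) 0 + PySem.List.pyGetD numbers y 0 = 0
        then result + 1 else result) r = _
  rw [PySem.List.foldl_pyRange_pyGetD' numbers 0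
    (fun acc jv => if PySem.List.pyGetD numbers (k : Int) 0 + jv = 0 then acc + 1 else acc)
    r (Int.natCast_nonneg k)]
  rw [PySem.List.foldl_ite_add_one]
  congr 1
  rw [Int.toNat_natCast, List.count_eq_countP]
  congr 1
  apply List.countP_congr
  intro x _
  simp only [PySem.List.pyGetD_natCast, decide_eq_true_eq, beq_iff_eq]
  omega

/-- A as a sum of suffix match-counts. -/
theorem pvA_sum (numbers : List Int) : count_zero_pairs numbers
    = ((List.range numbers.length).map
        (fun k => ((numbers.drop k).count (-(numbers.getD k 0)) : Int))).sum := by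
  unfold count_zero_pairs
  rw [PySem.List.pyRange_one, List.foldl_map]
  simp only [zero_add, Int.sub_zero, Int.toNat_natCast]
  simp only [pv_inner]
  rw [PySem.List.foldl_add, zero_add]

theorem pvA_eq_spec (numbers : List Int) : count_zero_pairs numbers = pvSpec numbers := by
  rw [pvA_sum]
  induction numbers with
  | nil => simp [pvSpec]
  | cons a l ih =>
    rw [List.length_cons, List.range_succ_eq_map, List.map_cons, List.map_map, List.sum_cons]
    have htail : ((List.range l.length).map
        ((fun k => (((a :: l).drop k).count (-((a :: l).getD k 0)) : Int)) ∘ Nat.succ))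
        = (List.range l.length).map (fun k => ((l.drop k).count (-(l.getD k 0)) : Int)) := by
      apply List.map_congr_left
      intro k _
      simp
    rw [htail, ih]
    simp only [List.drop_zero, List.getD_cons_zero]
    show ((a :: l).count (-a) : Int) + pvSpec l = pvSpec (a :: l)
    rw [show pvSpec (a :: l)
        = (if a + a = 0 then 1 else 0) + (l.count (-a) : Int) + pvSpec l from rfl]
    rw [List.count_cons]
    by_cases h : a + a = 0
    · have h' : (a == -a) = true := by rw [beq_iff_eq]; omega
      simp [h, h']
      ring
    · have h' : (a == -a) = false := by rw [beq_eq_false_iff_ne]; intro hc; omega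
      simp [h, h']

/-- B's loop over the counter items is a sum over the distinct values. -/
theorem pv_pairs_fold (c cm : Int → Int) (L : List Int) (r : Int) :
    (L.map (fun k => (k, c k))).foldl
      (fun result p => if p.1 > 0 then result + p.2 * cm p.1 else result) r
      = r + (L.map (fun v => if 0 < v then c v * cm v else 0)).sum := by
  induction L generalizing r with
  | nil => simp
  | cons v L ih =>
    by_cases h : 0 < v
    · simp only [List.map_cons, List.foldl_cons, List.sum_cons]
      rw [ih]
      simp [h]
      ring
    · simp only [List.map_cons, List.foldl_cons, List.sum_cons]
      rw [ih]
      simp [h]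

/-- B as a whole-list sum plus the zero-pair triangle term. -/
theorem pvB_closed (xs : List Int) : count_zero_pairs_alt xs
    = (xs.map (fun a => if 0 < a then (xs.count (-a) : Int) else 0)).sum
      + (xs.count 0 : Int) * ((xs.count 0 : Int) + 1) / 2 := by
  have h0 : count_zero_pairs_alt xs =
      (PySem.Dict.counter xs).items.foldl
        (fun result p =>
          if p.1 > 0 then result + p.2 * (PySem.Dict.counter xs).getD (-p.1) 0 else result) 0
      + PySem.Int.floordiv
          (((PySem.Dict.counter xs).getD 0 0) * ((PySem.Dict.counter xs).getD 0 0 + 1)) 2 := rfl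
  rw [h0, PySem.Dict.items_counter]
  rw [pv_pairs_fold (fun k => (xs.count k : Int))
    (fun k => (PySem.Dict.counter xs).getD (-k) 0) (PySem.Set.ofList xs) 0]
  simp only [PySem.Dict.getD_counter, zero_add]
  congr 1
  · rw [← List.sum_toFinset _ (PySem.Set.nodup_ofList xs)]
    have hfs : (PySem.Set.ofList xs).toFinset = xs.toFinset := by
      ext v
      simp [PySem.Set.mem_ofList]
    rw [hfs, Finset.sum_list_map_count]
    apply Finset.sum_congr rfl
    intro m _
    rw [nsmul_eq_mul]
    split
    · rfl
    · simp
  · rw [PySem.Int.floordiv_eq_ediv_of_pos (by norm_num)]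

theorem pvB_eq_spec (xs : List Int) : count_zero_pairs_alt xs = pvSpec xs := by
  rw [pvB_closed]
  induction xs with
  | nil => simp [pvSpec]
  | cons a l ih =>
    rw [List.map_cons, List.sum_cons]
    have hsplit : (l.map (fun x => if 0 < x then ((a :: l).count (-x) : Int) else 0)).sum
        = (l.map (fun x => if 0 < x then (l.count (-x) : Int) else 0)).sum
          + ((l.countP (fun x => decide (0 < x) && (x == -a))) : Int) := by
      have hmap : (l.map (fun x => if 0 < x then ((a :: l).count (-x) : Int) else 0))
          = l.map (fun x => (if 0 < x then (l.count (-x) : Int) else 0)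
              + (if (decide (0 < x) && (x == -a)) = true then 1 else 0)) := by
        apply List.map_congr_left
        intro x _
        rw [List.count_cons]
        by_cases hx : 0 < x
        · by_cases he : a = -x
          · have hb1 : (a == -x) = true := by rw [beq_iff_eq]; omega
            have hb2 : (x == -a) = true := by rw [beq_iff_eq]; omega
            simp [hx, hb1, hb2]
          · have hb1 : (a == -x) = false := by rw [beq_eq_false_iff_ne]; intro hc; omega
            have hb2 : (x == -a) = false := by rw [beq_eq_false_iff_ne]; intro hc; omega
            simp [hx, hb1, hb2]
        · simp [hx]
      rw [hmap, PySem.List.sum_map_add_int, PySem.List.sum_map_ite_one_zero]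
    rw [hsplit]
    have hcount : ((l.countP (fun x => decide (0 < x) && (x == -a))) : Int)
        = if a < 0 then (l.count (-a) : Int) else 0 := by
      by_cases ha : a < 0
      · rw [if_pos ha, List.count_eq_countP]
        congr 1
        apply List.countP_congr
        intro x _
        simp only [Bool.and_eq_true, decide_eq_true_eq, beq_iff_eq]
        constructor
        · rintro ⟨_, hx⟩
          exact hx
        · intro hx
          exact ⟨by omega, hx⟩
      · rw [if_neg ha]
        have hzero : l.countP (fun x => decide (0 < x) && (x == -a)) = 0 := by
          rw [List.countP_eq_zero]
          intro x _
          simp only [Bool.and_eq_true, decide_eq_true_eq, beq_iff_eq]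
          rintro ⟨hx, rfl⟩
          omega
        rw [hzero]
        rfl
    rw [hcount]
    have hz : ((a :: l).count 0 : Int) = (l.count 0 : Int) + (if a = 0 then 1 else 0) := by
      rw [List.count_cons]
      by_cases h : a = 0
      · have hb : (a == (0:Int)) = true := by rw [beq_iff_eq]; omega
        simp [hb]
        exact h
      · have hb : (a == (0:Int)) = false := by rw [beq_eq_false_iff_ne]; exact h
        simp [h, hb]
    rw [hz]
    have hhead : (if 0 < a then ((a :: l).count (-a) : Int) else 0)
        = if 0 < a then (l.count (-a) : Int) else 0 := by
      by_cases h : 0 < a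
      · have hb : (a == -a) = false := by rw [beq_eq_false_iff_ne]; intro hc; omega
        rw [List.count_cons, hb]
        simp
      · simp [h]
    rw [hhead]
    rw [show pvSpec (a :: l)
        = (if a + a = 0 then 1 else 0) + (l.count (-a) : Int) + pvSpec l from rfl]
    rw [← ih]
    generalize hS : (l.map (fun x => if 0 < x then (l.count (-x) : Int) else 0)).sum = S
    generalize hzv : (l.count 0 : Int) = z
    rcases lt_trichotomy a 0 with ha | ha | ha
    · have h1 : ¬ (0 < a) := by omega
      have h2 : ¬ (a = 0) := by omega
      have h3 : ¬ (a + a = 0) := by omega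
      simp only [h1, ha, h2, h3, if_true, if_false, add_zero]
      generalize z * (z + 1) = w
      omega
    · subst ha
      simp only [lt_irrefl, if_false, neg_zero, if_true, add_zero, hzv]
      have hw : (z + 1) * (z + 1 + 1) = z * (z + 1) + 2 * (z + 1) := by ring
      rw [hw]
      generalize z * (z + 1) = w
      omega
    · have h1 : ¬ (a < 0) := by omega
      have h2 : ¬ (a = 0) := by omega
      have h3 : ¬ (a + a = 0) := by omega
      simp only [ha, h1, h2, h3, if_true, if_false, add_zero]
      generalize z * (z + 1) = w
      omega

-- ===== VERDICT (by name: the statement is the Claim_ definition above) =====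
theorem count_zero_pairs_spec : Claim_equal_count_zero_pairs := by
  intro numbers _
  unfold Spec_count_zero_pairs
  rw [pvA_eq_spec, pvB_eq_spec]
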